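-- pv_equiv track=rewrite | github.com/cindyyj/leetcode_solutions | 2100-find-good-days-to-rob-the-bank/2100-find-good-days-to-rob-the-bank.py | goodDaysToRobBank
-- ===== SOURCE A (Python) =====
-- from typing import List
--
-- def goodDaysToRobBank(security: List[int], time: int) -> List[int]:
--
--     # https://leetcode-cn.com/problems/find-good-days-to-rob-the-bank/solution/qian-zhui-he-si-xiang-yi-dao-shou-huo-he-veza/
--
--     n = len(security)
--     left = [0] * n  # 前面递增的个数
--     right = [0] * n # 后面递减的个数
--
--     for i in range(1, n):
--         if security[i - 1] >= security[i]:
--             left[i] = left[i - 1] + 1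
--         # else left[i] = 0
--
--     for i in range(n-2, -1, -1):
--         if security[i + 1] >= security[i]:
--             right[i] = right[i + 1] + 1
--
--     ans = []
--     for i in range(n):
--         if left[i] >= time and right[i] >= time:
--             ans.append(i)
--     return ans
-- ===== SOURCE B (Python) =====
-- def goodDaysToRobBank(security, time):
--     # Prefix sums of trend violations: U counts strict rises, D counts strict drops.
--     # Day i is good iff the window of `time` steps before i has no rise and the
--     # window of `time` steps after i has no drop.
--     n = len(security)
--     t = max(time, 0)
--     U = [0] * n
--     D = [0] * n
--     for j in range(1, n):
--         U[j] = U[j - 1] + (1 if security[j - 1] < security[j] else 0)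
--         D[j] = D[j - 1] + (1 if security[j - 1] > security[j] else 0)
--     return [i for i in range(n)
--             if i >= t and i + t < n and U[i] == U[i - t] and D[i + t] == D[i]]
-- ===== Notes on version B (the rewrite author's own statement) =====
-- stated objective: alternative
-- what changed: B replaces A's two run-length arrays (forward left[] and backward right[]) by prefix sums of trend violations (strict rises U and strict drops D) computed in one forward sweep, selecting day i iff the time-step window before i contains no rise (U[i]==U[i-t]) and the window after i contains no drop (D[i+t]==D[i]).
import Mathlib
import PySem

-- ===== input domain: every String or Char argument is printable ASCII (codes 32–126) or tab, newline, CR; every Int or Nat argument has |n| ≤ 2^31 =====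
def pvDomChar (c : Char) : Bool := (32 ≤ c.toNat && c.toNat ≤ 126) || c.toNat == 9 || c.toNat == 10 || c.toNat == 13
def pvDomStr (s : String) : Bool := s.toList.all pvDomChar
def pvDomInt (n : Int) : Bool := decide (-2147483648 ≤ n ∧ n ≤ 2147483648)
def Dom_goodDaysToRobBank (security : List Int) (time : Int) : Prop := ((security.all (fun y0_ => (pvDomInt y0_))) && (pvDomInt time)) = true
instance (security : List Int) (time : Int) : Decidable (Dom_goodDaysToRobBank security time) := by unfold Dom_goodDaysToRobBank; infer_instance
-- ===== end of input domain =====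

-- B replaces A's pair of run-length arrays (forward `left`, backward `right`) by prefix sums
-- of trend VIOLATIONS (strict rises / strict drops) and window-sum comparisons; same O(n) cost,
-- a different algorithm (counting violations in a window instead of tracking run lengths).

-- ===== PORT A =====
-- left[i]: built by A's first loop; left[0] = 0 and for i ≥ 1,
-- left[i] = left[i-1] + 1 if security[i-1] >= security[i] else 0.
def leftA (security : List Int) : Nat → Int
  | 0 => 0
  | i + 1 =>
    if PySem.List.pyGetD security (↑i) 0 ≥ PySem.List.pyGetD security (↑(i + 1)) 0
    then leftA security i + 1 else 0

-- right[i]: built by A's backward loop; right[n-1] = 0 and for i ≤ n-2,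
-- right[i] = right[i+1] + 1 if security[i+1] >= security[i] else 0.
def rightA (security : List Int) (i : Nat) : Int :=
  if _h : i + 1 < security.length then
    if PySem.List.pyGetD security (↑(i + 1)) 0 ≥ PySem.List.pyGetD security (↑i) 0
    then rightA security (i + 1) + 1 else 0
  else 0
termination_by security.length - i

def goodDaysToRobBank (security : List Int) (time : Int) : List Int :=
  (List.range security.length).foldl
    (fun ans i =>
      if leftA security i ≥ time ∧ rightA security i ≥ time then ans ++ [(i : Int)] else ans)
    []

-- ===== PORT B =====
-- U[j]: number of strict rises security[k-1] < security[k] for k ≤ j (B's loop, first line).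
def prefU (security : List Int) : Nat → Int
  | 0 => 0
  | j + 1 =>
    prefU security j +
      (if PySem.List.pyGetD security (↑j) 0 < PySem.List.pyGetD security (↑(j + 1)) 0 then 1 else 0)

-- D[j]: number of strict drops security[k-1] > security[k] for k ≤ j (B's loop, second line).
def prefD (security : List Int) : Nat → Int
  | 0 => 0
  | j + 1 =>
    prefD security j +
      (if PySem.List.pyGetD security (↑j) 0 > PySem.List.pyGetD security (↑(j + 1)) 0 then 1 else 0)

def goodDaysToRobBank_alt (security : List Int) (time : Int) : List Int :=
  let t := (max time 0).toNat
  (List.range security.length).foldl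
    (fun ans i =>
      if t ≤ i ∧ i + t < security.length ∧
          prefU security i = prefU security (i - t) ∧
          prefD security (i + t) = prefD security i
      then ans ++ [(i : Int)] else ans)
    []

-- ===== PRECONDITION & SPEC =====
def Spec_goodDaysToRobBank (security : List Int) (time : Int) (out : List Int) : Prop := out = goodDaysToRobBank_alt security time
instance (security : List Int) (time : Int) (out : List Int) : Decidable (Spec_goodDaysToRobBank security time out) := by unfold Spec_goodDaysToRobBank; infer_instance

-- ===== CLAIM (what is proved, stated in full; the proofs are below) =====
def Claim_equal_goodDaysToRobBank : Prop := ∀ (security : List Int) (time : Int), Dom_goodDaysToRobBank security time → Spec_goodDaysToRobBank security time (goodDaysToRobBank security time)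

-- ===== LEMMAS AND PROOFS =====

theorem leftA_nonneg (s : List Int) (i : Nat) : 0 ≤ leftA s i := by
  induction i with
  | zero => simp [leftA]
  | succ i ih => simp only [leftA]; split <;> omega

theorem rightA_nonneg (s : List Int) (i : Nat) : 0 ≤ rightA s i := by
  rw [rightA]
  split
  · have := rightA_nonneg s (i + 1)
    split <;> omega
  · omega
termination_by s.length - i

theorem prefU_mono (s : List Int) (a b : Nat) (h : a ≤ b) : prefU s a ≤ prefU s b := by
  induction b with
  | zero =>
    have : a = 0 := by omega
    subst this; exact le_refl _
  | succ b ih =>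
    rcases Nat.lt_or_ge a (b + 1) with h' | h'
    · have := ih (by omega)
      simp only [prefU]; split <;> omega
    · have : a = b + 1 := by omega
      subst this; exact le_refl _

theorem prefD_mono (s : List Int) (a b : Nat) (h : a ≤ b) : prefD s a ≤ prefD s b := by
  induction b with
  | zero =>
    have : a = 0 := by omega
    subst this; exact le_refl _
  | succ b ih =>
    rcases Nat.lt_or_ge a (b + 1) with h' | h'
    · have := ih (by omega)
      simp only [prefD]; split <;> omega
    · have : a = b + 1 := by omega
      subst this; exact le_refl _

-- prefU a = prefU b ↔ no strict rise among adjacent pairs in [a, b]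
theorem prefU_eq_iff (s : List Int) (a b : Nat) (hab : a ≤ b) :
    prefU s a = prefU s b ↔ ∀ k, a ≤ k → k < b → s.getD (k + 1) 0 ≤ s.getD k 0 := by
  induction b with
  | zero =>
    have : a = 0 := by omega
    subst this
    simp
  | succ b ih =>
    rcases Nat.lt_or_ge a (b + 1) with h' | h'
    · have hrec := ih (by omega)
      have hm := prefU_mono s a b (by omega)
      simp only [prefU, PySem.List.pyGetD_natCast]
      by_cases hc : s.getD b 0 < s.getD (b + 1) 0
      · rw [if_pos hc]
        constructor
        · intro h; exfalso; omega
        · intro h; exact absurd (h b (by omega) (by omega)) (by omega)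
      · rw [if_neg hc]
        simp only [add_zero]
        rw [hrec]
        constructor
        · intro h k hk hk'
          rcases Nat.lt_or_ge k b with h2 | h2
          · exact h k hk h2
          · have : k = b := by omega
            subst this; omega
        · intro h k hk hk'
          exact h k hk (by omega)
    · have : a = b + 1 := by omega
      subst this
      constructor
      · intro _ k hk hk'; omega
      · intro _; rfl

theorem prefD_eq_iff (s : List Int) (a b : Nat) (hab : a ≤ b) :
    prefD s a = prefD s b ↔ ∀ k, a ≤ k → k < b → s.getD k 0 ≤ s.getD (k + 1) 0 := by
  induction b with
  | zero =>
    have : a = 0 := by omega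
    subst this
    simp
  | succ b ih =>
    rcases Nat.lt_or_ge a (b + 1) with h' | h'
    · have hrec := ih (by omega)
      have hm := prefD_mono s a b (by omega)
      simp only [prefD, PySem.List.pyGetD_natCast]
      by_cases hc : s.getD b 0 > s.getD (b + 1) 0
      · rw [if_pos hc]
        constructor
        · intro h; exfalso; omega
        · intro h; exact absurd (h b (by omega) (by omega)) (by omega)
      · rw [if_neg hc]
        simp only [add_zero]
        rw [hrec]
        constructor
        · intro h k hk hk'
          rcases Nat.lt_or_ge k b with h2 | h2
          · exact h k hk h2
          · have : k = b := by omega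
            subst this; omega
        · intro h k hk hk'
          exact h k hk (by omega)
    · have : a = b + 1 := by omega
      subst this
      constructor
      · intro _ k hk hk'; omega
      · intro _; rfl

-- A's left run: t ≤ left[i] ↔ t ≤ i and the last t adjacent pairs before i are non-increasing
theorem leftA_ge (s : List Int) (t : Nat) : ∀ i : Nat,
    (((t : Int) ≤ leftA s i) ↔ (t ≤ i ∧ ∀ k, i - t ≤ k → k < i → s.getD (k + 1) 0 ≤ s.getD k 0)) := by
  induction t with
  | zero =>
    intro i
    constructor
    · intro _; exact ⟨Nat.zero_le i, fun k hk hk' => by omega⟩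
    · intro _; exact_mod_cast leftA_nonneg s i
  | succ t ih =>
    intro i
    cases i with
    | zero =>
      simp only [leftA]
      constructor
      · intro h; exfalso; push_cast at h; omega
      · rintro ⟨hb, _⟩; omega
    | succ i =>
      simp only [leftA, PySem.List.pyGetD_natCast]
      by_cases h2 : s.getD i 0 ≥ s.getD (i + 1) 0
      · rw [if_pos h2]
        have hrec := ih i
        constructor
        · intro h
          have : (t : Int) ≤ leftA s i := by push_cast at h ⊢; omega
          obtain ⟨hb, hg⟩ := hrec.mp this
          refine ⟨by omega, fun k hk hk' => ?_⟩
          rcases Nat.lt_or_ge k i with h' | h'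
          · exact hg k (by omega) h'
          · have : k = i := by omega
            subst this; omega
        · rintro ⟨hb, hg⟩
          have : (t : Int) ≤ leftA s i :=
            hrec.mpr ⟨by omega, fun k hk hk' => hg k (by omega) (by omega)⟩
          push_cast; omega
      · rw [if_neg h2]
        constructor
        · intro h; exfalso; push_cast at h; omega
        · rintro ⟨hb, hg⟩
          exact absurd (hg i (by omega) (by omega)) (by omega)

-- A's right run: t ≤ right[i] ↔ i+t < n and the t adjacent pairs after i are non-decreasing
theorem rightA_ge (s : List Int) (t : Nat) : ∀ i : Nat, i < s.length →
    (((t : Int) ≤ rightA s i) ↔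
      (i + t < s.length ∧ ∀ k, i ≤ k → k < i + t → s.getD k 0 ≤ s.getD (k + 1) 0)) := by
  induction t with
  | zero =>
    intro i hi
    constructor
    · intro _; exact ⟨by omega, fun k hk hk' => by omega⟩
    · intro _; exact_mod_cast rightA_nonneg s i
  | succ t ih =>
    intro i hi
    rw [rightA]
    by_cases h1 : i + 1 < s.length
    · rw [dif_pos h1]
      simp only [PySem.List.pyGetD_natCast]
      by_cases h2 : s.getD (i + 1) 0 ≥ s.getD i 0
      · rw [if_pos h2]
        have hrec := ih (i + 1) h1
        constructor
        · intro h
          have : (t : Int) ≤ rightA s (i + 1) := by push_cast at h ⊢; omega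
          obtain ⟨hb, hg⟩ := hrec.mp this
          refine ⟨by omega, fun k hk hk' => ?_⟩
          rcases Nat.eq_or_lt_of_le hk with h' | h'
          · subst h'; exact h2
          · exact hg k (by omega) (by omega)
        · rintro ⟨hb, hg⟩
          have : (t : Int) ≤ rightA s (i + 1) :=
            hrec.mpr ⟨by omega, fun k hk hk' => hg k (by omega) (by omega)⟩
          push_cast; omega
      · rw [if_neg h2]
        constructor
        · intro h; exfalso; push_cast at h; omega
        · rintro ⟨hb, hg⟩
          exact absurd (hg i (le_refl i) (by omega)) h2
    · rw [dif_neg h1]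
      constructor
      · intro h; exfalso; push_cast at h; omega
      · rintro ⟨hb, _⟩; omega

-- pointwise agreement of the two selection conditions
theorem cond_iff (s : List Int) (time : Int) (i : Nat) (hi : i < s.length) :
    (leftA s i ≥ time ∧ rightA s i ≥ time) ↔
    ((max time 0).toNat ≤ i ∧ i + (max time 0).toNat < s.length ∧
      prefU s i = prefU s (i - (max time 0).toNat) ∧
      prefD s (i + (max time 0).toNat) = prefD s i) := by
  set t : Nat := (max time 0).toNat with ht
  by_cases h0 : time ≤ 0
  · have ht0 : t = 0 := by omega
    have h1 := leftA_nonneg s i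
    have h2 := rightA_nonneg s i
    rw [ht0]
    constructor
    · intro _
      exact ⟨Nat.zero_le i, by omega, by rw [Nat.sub_zero], by rw [Nat.add_zero]⟩
    · intro _; constructor <;> omega
  · have htt : time = ((t : Nat) : Int) := by omega
    rw [htt]
    rw [ge_iff_le, ge_iff_le, leftA_ge s t i, rightA_ge s t i hi]
    constructor
    · rintro ⟨⟨hti, hgl⟩, hb, hgr⟩
      refine ⟨hti, hb, ?_, ?_⟩
      · exact ((prefU_eq_iff s (i - t) i (by omega)).mpr hgl).symm
      · exact ((prefD_eq_iff s i (i + t) (by omega)).mpr hgr).symm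
    · rintro ⟨hti, hb, hU, hD⟩
      exact ⟨⟨hti, (prefU_eq_iff s (i - t) i (by omega)).mp hU.symm⟩,
             hb, (prefD_eq_iff s i (i + t) (by omega)).mp hD.symm⟩

-- ===== VERDICT (by name: the statement is the Claim_ definition above) =====
theorem goodDaysToRobBank_spec : Claim_equal_goodDaysToRobBank := by
  unfold Claim_equal_goodDaysToRobBank
  intro security time _dom
  unfold Spec_goodDaysToRobBank goodDaysToRobBank goodDaysToRobBank_alt
  have keyA := PySem.List.foldl_append_if
    (fun i : Nat => decide (leftA security i ≥ time ∧ rightA security i ≥ time))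
    (fun i : Nat => (i : Int)) (List.range security.length) []
  simp only [decide_eq_true_eq] at keyA
  rw [keyA]
  have keyB := PySem.List.foldl_append_if
    (fun i : Nat => decide ((max time 0).toNat ≤ i ∧ i + (max time 0).toNat < security.length ∧
      prefU security i = prefU security (i - (max time 0).toNat) ∧
      prefD security (i + (max time 0).toNat) = prefD security i))
    (fun i : Nat => (i : Int)) (List.range security.length) []
  simp only [decide_eq_true_eq] at keyB
  rw [keyB]
  simp only [List.nil_append]
  apply congrArg
  apply List.filter_congr
  intro i hi
  rw [List.mem_range] at hi
  simp only [decide_eq_decide]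
  exact cond_iff security time i hi
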